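-- pv_equiv track=rewrite | github.com/ultragorira/Algo_and_BigONotation | tandem_bike.py | tandemBicycle
-- ===== SOURCE A (Python) =====
-- def tandemBicycle(redShirtSpeeds, blueShirtSpeeds, fastest):
-- 	redShirtSpeeds.sort()
-- 	blueShirtSpeeds.sort()
-- 	speed = 0
--
-- 	while len(redShirtSpeeds) > 0:
-- 		if fastest:
-- 			if redShirtSpeeds[-1] >= blueShirtSpeeds[-1]:
-- 				speed += max(redShirtSpeeds[-1], blueShirtSpeeds[0])
-- 				removeItem(redShirtSpeeds, blueShirtSpeeds, -1, 0)
-- 			else: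
-- 				speed += max(blueShirtSpeeds[-1], redShirtSpeeds[0])
-- 				removeItem(redShirtSpeeds, blueShirtSpeeds, 0, -1)
-- 		else:
-- 			for i in reversed(redShirtSpeeds):
-- 				speed += max(redShirtSpeeds[0], blueShirtSpeeds[0])
-- 				removeItem(redShirtSpeeds, blueShirtSpeeds, 0,0)
--
--
-- 	return speed
--
-- def removeItem(redShirtSpeeds, blueShirtSpeeds, idx1, idx2):
--
-- 	del redShirtSpeeds[idx1]
-- 	del blueShirtSpeeds[idx2]
-- ===== SOURCE B (Python) =====
-- def tandemBicycle(redShirtSpeeds, blueShirtSpeeds, fastest):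
--     # Note: A sorts its arguments in place; B does not mutate them (return-value equivalence).
--     rs = sorted(redShirtSpeeds)
--     bs = sorted(blueShirtSpeeds)
--     if not fastest:
--         return sum(max(x, y) for x, y in zip(rs, bs))
--     # fastest: the best total is the sum of the len(rs) largest speeds overall;
--     # collect them by repeatedly popping the larger of the two sorted lists' tops
--     total = 0
--     for _ in range(len(rs)):
--         if not bs or (rs and rs[-1] >= bs[-1]):
--             total += rs.pop()
--         else:
--             total += bs.pop()
--     return total
-- ===== Notes on version B (the rewrite author's own statement) =====
-- stated objective: faster
-- what changed: Replaces A's O(n^2) greedy loops with per-step list deletions (and an inner reversed-iterator loop) by direct index pairing for the slow case and, for the fastest case, top-k selection: the answer is the sum of the len(red) largest speeds of the combined pool, collected by popping the larger of the two sorted tops.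
import Mathlib
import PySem

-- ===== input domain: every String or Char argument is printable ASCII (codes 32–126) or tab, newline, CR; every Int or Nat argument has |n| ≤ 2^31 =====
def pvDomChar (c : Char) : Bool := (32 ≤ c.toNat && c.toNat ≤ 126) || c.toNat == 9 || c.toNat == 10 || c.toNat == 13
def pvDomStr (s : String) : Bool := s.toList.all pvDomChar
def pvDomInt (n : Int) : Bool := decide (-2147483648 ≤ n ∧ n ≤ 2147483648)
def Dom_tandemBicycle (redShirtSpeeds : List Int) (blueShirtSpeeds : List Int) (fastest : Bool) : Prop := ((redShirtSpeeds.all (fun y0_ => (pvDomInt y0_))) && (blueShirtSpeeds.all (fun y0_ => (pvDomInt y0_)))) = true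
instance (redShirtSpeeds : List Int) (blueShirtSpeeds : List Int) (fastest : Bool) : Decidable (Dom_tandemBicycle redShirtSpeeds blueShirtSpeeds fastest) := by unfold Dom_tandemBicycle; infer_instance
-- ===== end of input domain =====

-- B replaces A's deletion-driven greedy loops by a zip pairing (slow case) and a top-k
-- selection popping the larger sorted top (fastest case); A sorts its arguments in place,
-- B does not — the equivalence proved here is about the RETURN value only.

-- ===== PORT A =====
-- the 'for i in reversed(redShirtSpeeds)' loop (fastest == False branch): the reversed-list
-- iterator keeps an index k that starts at len-1 and decrements while 0 ≤ k < current len;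
-- each step reads red[0], blue[0] and removeItem deletes both fronts. none from pyGet? =
-- IndexError (the loop state is returned as-is; those inputs are outside Pre_).
def innerA : Nat → Int → List Int → List Int → Int → (List Int × List Int × Int)
  | 0, _, r, b, speed => (r, b, speed)
  | fuel+1, k, r, b, speed =>
    if 0 ≤ k ∧ k < (r.length : Int) then
      match PySem.List.pyGet? r 0, PySem.List.pyGet? b 0 with
      | some r0, some b0 => innerA fuel (k - 1) r.tail b.tail (speed + max r0 b0)
      | _, _ => (r, b, speed)                 -- IndexError
    else (r, b, speed)

-- the 'while len(redShirtSpeeds) > 0' loop; fuel bounds the iterations (each fastest step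
-- deletes one red element; the inner loop empties red). none from pyGet? = IndexError,
-- modelled by returning the accumulated speed (outside Pre_).
def loopA : Nat → List Int → List Int → Bool → Int → Int
  | 0, _, _, _, speed => speed
  | fuel+1, r, b, fastest, speed =>
    if r.length > 0 then
      if fastest then
        match PySem.List.pyGet? r (-1), PySem.List.pyGet? b (-1) with
        | some rl, some bl =>
          if rl ≥ bl then
            match PySem.List.pyGet? b 0 with
            | some b0 => loopA fuel r.dropLast b.tail fastest (speed + max rl b0)   -- removeItem(-1, 0)
            | none => speed
          else
            match PySem.List.pyGet? r 0 with
            | some r0 => loopA fuel r.tail b.dropLast fastest (speed + max bl r0)   -- removeItem(0, -1)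
            | none => speed
        | _, _ => speed                       -- IndexError
      else
        match innerA r.length ((r.length : Int) - 1) r b speed with
        | (r', b', speed') => loopA fuel r' b' fastest speed'
    else speed

def tandemBicycle (redShirtSpeeds : List Int) (blueShirtSpeeds : List Int) (fastest : Bool) : Int :=
  let r := PySem.List.sorted redShirtSpeeds (fun x => x) false
  let b := PySem.List.sorted blueShirtSpeeds (fun x => x) false
  loopA (r.length + 1) r b fastest 0

-- ===== PORT B =====
-- the 'for _ in range(len(rs))' loop of Source B: pop the larger of the two sorted tops;
-- rs[-1] / bs[-1] are read with pyGetD (the guards make the default unreachable)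
def fastMergeB : Nat → List Int → List Int → Int → Int
  | 0, _, _, total => total
  | c+1, rs, bs, total =>
    if bs = [] ∨ (rs ≠ [] ∧ PySem.List.pyGetD rs (-1) 0 ≥ PySem.List.pyGetD bs (-1) 0) then
      fastMergeB c rs.dropLast bs (total + PySem.List.pyGetD rs (-1) 0)
    else
      fastMergeB c rs bs.dropLast (total + PySem.List.pyGetD bs (-1) 0)

def tandemBicycle_alt (redShirtSpeeds : List Int) (blueShirtSpeeds : List Int) (fastest : Bool) : Int :=
  let rs := PySem.List.sorted redShirtSpeeds (fun x => x) false
  let bs := PySem.List.sorted blueShirtSpeeds (fun x => x) false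
  if fastest = false then ((rs.zip bs).map (fun p => max p.1 p.2)).sum
  else fastMergeB rs.length rs bs 0

-- ===== PRECONDITION & SPEC =====
-- Pre_ is exactly the domain on which A returns: with more red than blue riders A deletes
-- one blue per step and raises IndexError once blue is exhausted while red is not.
def Pre_tandemBicycle (redShirtSpeeds : List Int) (blueShirtSpeeds : List Int) (fastest : Bool) : Prop :=
  redShirtSpeeds.length ≤ blueShirtSpeeds.length
instance (redShirtSpeeds : List Int) (blueShirtSpeeds : List Int) (fastest : Bool) : Decidable (Pre_tandemBicycle redShirtSpeeds blueShirtSpeeds fastest) := by unfold Pre_tandemBicycle; infer_instance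

def pvWitness_tandemBicycle : List Int × List Int × Bool := ([5, 1, 3], [2, 4, 9], true)

def Spec_tandemBicycle (redShirtSpeeds : List Int) (blueShirtSpeeds : List Int) (fastest : Bool) (out : Int) : Prop := out = tandemBicycle_alt redShirtSpeeds blueShirtSpeeds fastest
instance (redShirtSpeeds : List Int) (blueShirtSpeeds : List Int) (fastest : Bool) (out : Int) : Decidable (Spec_tandemBicycle redShirtSpeeds blueShirtSpeeds fastest out) := by unfold Spec_tandemBicycle; infer_instance

-- ===== CLAIM (what is proved, stated in full; the proofs are below) =====
def Claim_equal_tandemBicycle : Prop := ∀ (redShirtSpeeds : List Int) (blueShirtSpeeds : List Int) (fastest : Bool), Dom_tandemBicycle redShirtSpeeds blueShirtSpeeds fastest → Pre_tandemBicycle redShirtSpeeds blueShirtSpeeds fastest → Spec_tandemBicycle redShirtSpeeds blueShirtSpeeds fastest (tandemBicycle redShirtSpeeds blueShirtSpeeds fastest)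

-- ===== LEMMAS AND PROOFS =====
def pairSum (xs ys : List Int) : Int := ((xs.zip ys).map (fun p => max p.1 p.2)).sum

theorem pairSum_nil (ys : List Int) : pairSum [] ys = 0 := rfl

theorem pairSum_cons (x y : Int) (xs ys : List Int) :
    pairSum (x :: xs) (y :: ys) = max x y + pairSum xs ys := rfl

-- the inner reversed-iterator loop pairs the two fronts index-wise until red is empty
theorem innerA_eq (r : List Int) : ∀ (b : List Int) (speed : Int) (fuel : Nat),
    r.length ≤ b.length → r.length ≤ fuel →
    innerA fuel ((r.length : Int) - 1) r b speed
      = ([], b.drop r.length, speed + pairSum r b) := by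
  induction r with
  | nil =>
    intro b speed fuel _ _
    cases fuel <;> simp [innerA, pairSum_nil]
  | cons x xs ih =>
    intro b speed fuel hlen hfuel
    cases b with
    | nil => simp at hlen
    | cons y ys =>
      cases fuel with
      | zero => simp at hfuel
      | succ m =>
        have h1 : (0 : Int) ≤ ((x :: xs).length : Int) - 1 ∧
            ((x :: xs).length : Int) - 1 < ((x :: xs).length : Int) := by
          simp only [List.length_cons]; omega
        have h2 : xs.length ≤ ys.length := by simpa using hlen
        have h3 : ((x :: xs).length : Int) - 1 - 1 = (xs.length : Int) - 1 := by
          simp only [List.length_cons]; push_cast; ring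
        simp only [innerA, h1, and_self, if_true, PySem.List.pyGet?_zero_cons,
          List.tail_cons, h3]
        rw [ih ys (speed + max x y) m h2 (by simpa using hfuel)]
        simp [pairSum_cons, add_assoc]

theorem loopA_nil (b : List Int) (fastest : Bool) (speed : Int) (fuel : Nat) :
    loopA fuel [] b fastest speed = speed := by
  cases fuel <;> simp [loopA]

-- the slow path: one run of the inner loop consumes red, pairing index-wise
theorem loopA_slow (r b : List Int) (speed : Int) (fuel : Nat)
    (hlen : r.length ≤ b.length) (hfuel : 1 ≤ fuel) :
    loopA fuel r b false speed = speed + pairSum r b := by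
  cases r with
  | nil => simp [loopA_nil, pairSum_nil]
  | cons x xs =>
    cases fuel with
    | zero => omega
    | succ m =>
      have hpos : (x :: xs).length > 0 := by simp
      simp only [loopA, hpos, if_true, Bool.false_eq_true, if_false]
      rw [innerA_eq (x :: xs) b speed (x :: xs).length hlen le_rfl]
      simp [loopA_nil]

-- B's pop-merge never touches the untouched bottom of the blue list …
theorem fastMergeB_cons_blue (m : Nat) : ∀ (rs bt : List Int) (b0 total : Int),
    m ≤ bt.length → fastMergeB m rs (b0 :: bt) total = fastMergeB m rs bt total := by
  induction m with
  | zero => intros; rfl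
  | succ m ih =>
    intro rs bt b0 total h
    obtain ⟨bt', z, rfl⟩ : ∃ bt' z, bt = bt' ++ [z] := by
      rcases List.eq_nil_or_concat bt with hc | ⟨bt', z, hc⟩
      · subst hc; simp at h
      · exact ⟨bt', z, by simpa using hc⟩
    have e1 : b0 :: (bt' ++ [z]) = (b0 :: bt') ++ [z] := by simp
    rw [e1]
    have hlen' : m ≤ bt'.length + 1 := by simp at h; omega
    simp only [fastMergeB, PySem.List.pyGetD_neg_one_append_singleton]
    by_cases hrs : rs ≠ [] ∧ PySem.List.pyGetD rs (-1) 0 ≥ z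
    · rw [if_pos (Or.inr hrs), if_pos (Or.inr hrs)]
      rw [← e1]
      exact ih rs.dropLast (bt' ++ [z]) b0 _ (by simpa using hlen')
    · have hc1 : ¬ ((b0 :: bt') ++ [z] = [] ∨ (rs ≠ [] ∧ PySem.List.pyGetD rs (-1) 0 ≥ z)) := by
        simp only [not_or]; exact ⟨by simp, hrs⟩
      have hc2 : ¬ (bt' ++ [z] = [] ∨ (rs ≠ [] ∧ PySem.List.pyGetD rs (-1) 0 ≥ z)) := by
        simp only [not_or]; exact ⟨by simp, hrs⟩
      rw [if_neg hc1, if_neg hc2, List.dropLast_concat, List.dropLast_concat]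
      exact ih rs bt' b0 _ (by simp at h; omega)

-- … nor the untouched bottom of the red list
theorem fastMergeB_cons_red (m : Nat) : ∀ (rt bs : List Int) (r0 total : Int),
    m ≤ rt.length → fastMergeB m (r0 :: rt) bs total = fastMergeB m rt bs total := by
  induction m with
  | zero => intros; rfl
  | succ m ih =>
    intro rt bs r0 total h
    obtain ⟨rt', z, rfl⟩ : ∃ rt' z, rt = rt' ++ [z] := by
      rcases List.eq_nil_or_concat rt with hc | ⟨rt', z, hc⟩
      · subst hc; simp at h
      · exact ⟨rt', z, by simpa using hc⟩
    have e1 : r0 :: (rt' ++ [z]) = (r0 :: rt') ++ [z] := by simp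
    rw [e1]
    simp only [fastMergeB, PySem.List.pyGetD_neg_one_append_singleton]
    by_cases hc : bs = [] ∨ z ≥ PySem.List.pyGetD bs (-1) 0
    · have hc1 : (bs = [] ∨ ((r0 :: rt') ++ [z] ≠ [] ∧ z ≥ PySem.List.pyGetD bs (-1) 0)) := by
        rcases hc with hc | hc
        · exact Or.inl hc
        · exact Or.inr ⟨by simp, hc⟩
      have hc2 : (bs = [] ∨ (rt' ++ [z] ≠ [] ∧ z ≥ PySem.List.pyGetD bs (-1) 0)) := by
        rcases hc with hc | hc
        · exact Or.inl hc
        · exact Or.inr ⟨by simp, hc⟩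
      rw [if_pos hc1, if_pos hc2, List.dropLast_concat, List.dropLast_concat]
      exact ih rt' bs r0 _ (by simp at h; omega)
    · have hc1 : ¬ (bs = [] ∨ ((r0 :: rt') ++ [z] ≠ [] ∧ z ≥ PySem.List.pyGetD bs (-1) 0)) := by
        simp only [not_or] at hc ⊢
        exact ⟨hc.1, fun hx => hc.2 hx.2⟩
      have hc2 : ¬ (bs = [] ∨ (rt' ++ [z] ≠ [] ∧ z ≥ PySem.List.pyGetD bs (-1) 0)) := by
        simp only [not_or] at hc ⊢
        exact ⟨hc.1, fun hx => hc.2 hx.2⟩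
      rw [if_neg hc1, if_neg hc2, ← e1]
      exact ih (rt' ++ [z]) bs.dropLast r0 _ (by simp at h ⊢; omega)

-- the fastest greedy (remove overall-max and the other colour's min each step) picks
-- exactly the len(red) largest speeds, i.e. agrees with B's pop-merge
theorem loopA_fast (n : Nat) : ∀ (r b : List Int) (speed : Int) (fuel : Nat),
    r.Pairwise (· ≤ ·) → b.Pairwise (· ≤ ·) →
    r.length = n → r.length ≤ b.length → r.length ≤ fuel →
    loopA fuel r b true speed = fastMergeB r.length r b speed := by
  induction n with
  | zero =>
    intro r b speed fuel _ _ hn _ _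
    obtain rfl : r = [] := List.eq_nil_of_length_eq_zero hn
    simp [loopA_nil, fastMergeB]
  | succ m ih =>
    intro r b speed fuel hr hb hn hlen hfuel
    obtain ⟨r', rl, rfl⟩ : ∃ r' rl, r = r' ++ [rl] := by
      rcases List.eq_nil_or_concat r with h | ⟨r', rl, h⟩
      · exfalso; subst h; simp at hn
      · exact ⟨r', rl, by simpa using h⟩
    obtain ⟨b', bl, rfl⟩ : ∃ b' bl, b = b' ++ [bl] := by
      rcases List.eq_nil_or_concat b with h | ⟨b', bl, h⟩
      · exfalso; subst h; simp at hlen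
      · exact ⟨b', bl, by simpa using h⟩
    cases fuel with
    | zero => exfalso; simp at hfuel
    | succ fuel =>
      have hrlen : r'.length = m := by simpa using hn
      have hblen : m ≤ b'.length := by simp at hlen; omega
      have hfuel' : m ≤ fuel := by simp at hfuel; omega
      have hlenpos : (r' ++ [rl]).length > 0 := by simp
      simp only [loopA, hlenpos, if_pos, PySem.List.pyGet?_neg_one_append_singleton]
      by_cases hcmp : rl ≥ bl
      · -- A removes red's top and blue's min; B pops the red top
        obtain ⟨b0, bt, hB⟩ : ∃ b0 bt, b' ++ [bl] = b0 :: bt := by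
          cases b' with
          | nil => exact ⟨bl, [], rfl⟩
          | cons y ys => exact ⟨y, ys ++ [bl], rfl⟩
        have hbtlen : bt.length = b'.length := by
          have := congrArg List.length hB; simp at this; omega
        have hb0bl : b0 ≤ bl := by
          have hbP : (b0 :: bt).Pairwise (· ≤ ·) := hB ▸ hb
          have hblmem : bl ∈ b0 :: bt := hB ▸ (by simp)
          rcases List.mem_cons.mp hblmem with h | h
          · omega
          · exact (List.pairwise_cons.mp hbP).1 bl h
        have hmax : max rl b0 = rl := max_eq_left (le_trans hb0bl hcmp)
        have hBside : fastMergeB (r' ++ [rl]).length (r' ++ [rl]) (b' ++ [bl]) speed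
            = fastMergeB r'.length r' bt (speed + rl) := by
          rw [show (r' ++ [rl]).length = m + 1 by simp [hrlen]]
          simp only [fastMergeB, PySem.List.pyGetD_neg_one_append_singleton]
          rw [if_pos (Or.inr ⟨by simp, hcmp⟩), List.dropLast_concat, hB,
            fastMergeB_cons_blue m r' bt b0 (speed + rl) (by omega), hrlen]
        rw [hBside, hB]
        simp only [if_pos hcmp, PySem.List.pyGet?_zero_cons, List.dropLast_concat,
          List.tail_cons, hmax]
        exact ih r' bt (speed + rl) fuel (hr.sublist (List.sublist_append_left r' [rl]))
          ((hB ▸ hb).of_cons) hrlen (by omega) (by omega)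
      · -- A removes red's min and blue's top; B pops the blue top
        obtain ⟨r0, rt, hR⟩ : ∃ r0 rt, r' ++ [rl] = r0 :: rt := by
          cases r' with
          | nil => exact ⟨rl, [], rfl⟩
          | cons y ys => exact ⟨y, ys ++ [rl], rfl⟩
        have hrtlen : rt.length = m := by
          have := congrArg List.length hR; simp at this; omega
        have hr0rl : r0 ≤ rl := by
          have hrP : (r0 :: rt).Pairwise (· ≤ ·) := hR ▸ hr
          have hrlmem : rl ∈ r0 :: rt := hR ▸ (by simp)
          rcases List.mem_cons.mp hrlmem with h | h
          · omega
          · exact (List.pairwise_cons.mp hrP).1 rl h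
        have hmax : max bl r0 = bl := max_eq_left (by omega)
        have hBside : fastMergeB (r' ++ [rl]).length (r' ++ [rl]) (b' ++ [bl]) speed
            = fastMergeB rt.length rt b' (speed + bl) := by
          rw [show (r' ++ [rl]).length = m + 1 by simp [hrlen]]
          simp only [fastMergeB, PySem.List.pyGetD_neg_one_append_singleton]
          have hcnd : ¬ (b' ++ [bl] = [] ∨ ((r' ++ [rl]) ≠ [] ∧ rl ≥ bl)) := by
            simp only [not_or]; exact ⟨by simp, fun hx => hcmp hx.2⟩
          rw [if_neg hcnd, List.dropLast_concat, hR,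
            fastMergeB_cons_red m rt b' r0 (speed + bl) (by omega), hrtlen]
        rw [hBside, hR]
        simp only [if_neg hcmp, PySem.List.pyGet?_zero_cons, List.dropLast_concat,
          List.tail_cons, hmax]
        exact ih rt b' (speed + bl) fuel ((hR ▸ hr).of_cons)
          (hb.sublist (List.sublist_append_left b' [bl])) hrtlen (by omega) (by omega)

theorem len_sorted_id (xs : List Int) :
    (PySem.List.sorted xs (fun x => x) false).length = xs.length :=
  PySem.List.length_sorted ..

-- ===== VERDICT (by name: the statement is the Claim_ definition above) =====
theorem tandemBicycle_spec : Claim_equal_tandemBicycle := by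
  intro red blue fastest _ hpre
  unfold Spec_tandemBicycle tandemBicycle tandemBicycle_alt
  have hlen : (PySem.List.sorted red (fun x => x) false).length
      ≤ (PySem.List.sorted blue (fun x => x) false).length := by
    rw [len_sorted_id, len_sorted_id]; exact hpre
  cases fastest with
  | false =>
    rw [loopA_slow _ _ 0 _ hlen (by omega)]
    simp [pairSum]
  | true =>
    have hr : (PySem.List.sorted red (fun x => x) false).Pairwise (· ≤ ·) := by
      have := PySem.List.sorted_pairwise (xs := red) (key := fun x => x)
      simpa using this
    have hb : (PySem.List.sorted blue (fun x => x) false).Pairwise (· ≤ ·) := by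
      have := PySem.List.sorted_pairwise (xs := blue) (key := fun x => x)
      simpa using this
    rw [loopA_fast (PySem.List.sorted red (fun x => x) false).length _ _ 0 _ hr hb rfl hlen
      (by omega)]
    simp
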